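-- pv_equiv track=rewrite | github.com/WeronikaKowalkowska/telekomunikacja2025 | zadanie3/main.py | decode_with_dict
-- ===== SOURCE A (Python) =====
-- def decode_with_dict(encoded, code_dict):
--     reverse_dict = {}
--     for k, v in code_dict.items():  # odwracamy słownik: binarny kod -> znak
--         reverse_dict[v] = k
--     decoded = ""  # wynikowy, odkodowany tekst
--     buffer = ""  # przechowuje bieżący ciąg bitów, które są sprawdzane, czy pasują do jakiegoś kodu ze słownika
--
--     for bit in encoded:
--         buffer += bit
--         if buffer in reverse_dict:
--             decoded += reverse_dict[buffer]
--             buffer = ""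
--     return decoded
-- ===== SOURCE B (Python) =====
-- def decode_with_dict(encoded, code_dict):
--     codes = {}
--     maxlen = 0
--     for k, v in code_dict.items():
--         codes[v] = k
--         if len(v) > maxlen:
--             maxlen = len(v)
--     out = []
--     i = 0
--     n = len(encoded)
--     while i < n:
--         hit = None
--         j = i + 1
--         while j <= n and j <= i + maxlen:
--             if encoded[i:j] in codes:
--                 hit = j
--                 break
--             j += 1
--         if hit is None:
--             break
--         out.append(codes[encoded[i:hit]])
--         i = hit
--     return "".join(out)
-- ===== Notes on version B (the rewrite author's own statement) =====
-- stated objective: alternative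
-- what changed: Replaces A's streaming fold (ever-growing buffer string tested against a reversed dict on every bit) by an index-based matcher that only tries windows of length up to the maximum code length and stops as soon as no code can match the remaining stream.
import Mathlib
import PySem

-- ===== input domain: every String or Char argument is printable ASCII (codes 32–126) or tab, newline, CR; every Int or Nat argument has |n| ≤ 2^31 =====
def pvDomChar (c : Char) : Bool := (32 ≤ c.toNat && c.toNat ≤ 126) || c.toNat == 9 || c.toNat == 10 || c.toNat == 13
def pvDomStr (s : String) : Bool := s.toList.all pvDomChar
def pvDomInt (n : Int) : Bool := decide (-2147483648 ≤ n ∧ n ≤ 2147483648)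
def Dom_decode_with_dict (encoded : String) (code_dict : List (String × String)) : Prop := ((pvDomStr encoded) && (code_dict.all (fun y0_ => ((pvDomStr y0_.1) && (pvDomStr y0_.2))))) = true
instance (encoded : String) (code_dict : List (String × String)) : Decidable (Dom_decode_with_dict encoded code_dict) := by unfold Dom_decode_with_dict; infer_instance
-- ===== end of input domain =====

-- B replaces A's streaming fold (growing buffer tested against a reversed dict on every
-- bit) by an index-based matcher that tries only windows of length ≤ the max code length
-- and stops once no code can match the rest of the stream; equal return values.

-- ===== PORT A =====
def decode_with_dict (encoded : String) (code_dict : List (String × String)) : String :=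
  -- reverse_dict = {}; for k, v in code_dict.items(): reverse_dict[v] = k
  let reverse_dict : PySem.Dict String String :=
    code_dict.foldl (fun d kv => d.insert kv.2 kv.1) PySem.Dict.empty
  -- decoded = ""; buffer = ""; for bit in encoded: …  (strings carried as List Char)
  let st := encoded.toList.foldl
    (fun (st : List Char × List Char) bit =>
      let buffer := st.2 ++ [bit]
      match reverse_dict.get? (String.ofList buffer) with
      | some ch => (st.1 ++ ch.toList, ([] : List Char))
      | none => (st.1, buffer))
    (([] : List Char), ([] : List Char))
  String.ofList st.1

-- ===== PORT B =====
-- codes = {}; maxlen = 0; for k, v in code_dict.items(): codes[v] = k; if len(v) > maxlen: maxlen = len(v)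
def pvCodesMax (code_dict : List (String × String)) : PySem.Dict String String × Nat :=
  code_dict.foldl
    (fun (st : PySem.Dict String String × Nat) kv =>
      (st.1.insert kv.2 kv.1,
       if kv.2.toList.length > st.2 then kv.2.toList.length else st.2))
    (PySem.Dict.empty, 0)

-- inner while of Source B: j runs from i+1 while j <= n and j <= i + maxlen; the bound
-- j <= i + maxlen is carried as the fuel (= i + maxlen + 1 - j); piece = encoded[i:j]
def pvScan (codes : PySem.Dict String String) (cs : List Char) (n i : Nat) : Nat → Nat → Option Nat
  | _, 0 => none
  | j, fuel + 1 =>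
    if j ≤ n then
      if (codes.get? (String.ofList ((cs.drop i).take (j - i)))).isSome then some j
      else pvScan codes cs n i (j + 1) fuel
    else none

-- outer while of Source B: while i < n: find hit, emit codes[encoded[i:hit]], i = hit;
-- fuel = n - i is enough since i strictly increases
def pvLoop (codes : PySem.Dict String String) (maxlen : Nat) (cs : List Char) (n : Nat) : Nat → Nat → List Char
  | _, 0 => []
  | i, fuel + 1 =>
    if i < n then
      match pvScan codes cs n i (i + 1) maxlen with
      | none => []
      | some hit =>
        (match codes.get? (String.ofList ((cs.drop i).take (hit - i))) with
         | some ch => ch.toList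
         | none => []) ++ pvLoop codes maxlen cs n hit fuel
    else []

def decode_with_dict_alt (encoded : String) (code_dict : List (String × String)) : String :=
  let cm := pvCodesMax code_dict
  let cs := encoded.toList
  String.ofList (pvLoop cm.1 cm.2 cs cs.length 0 cs.length)

-- ===== PRECONDITION & SPEC =====
def Spec_decode_with_dict (encoded : String) (code_dict : List (String × String)) (out : String) : Prop := out = decode_with_dict_alt encoded code_dict
instance (encoded : String) (code_dict : List (String × String)) (out : String) : Decidable (Spec_decode_with_dict encoded code_dict out) := by unfold Spec_decode_with_dict; infer_instance

-- ===== CLAIM (what is proved, stated in full; the proofs are below) =====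
def Claim_equal_decode_with_dict : Prop := ∀ (encoded : String) (code_dict : List (String × String)), Dom_decode_with_dict encoded code_dict → Spec_decode_with_dict encoded code_dict (decode_with_dict encoded code_dict)

-- ===== LEMMAS AND PROOFS =====

-- A's loop, emissions only: Aemit R cs b = what A appends to `decoded` while consuming
-- cs with current buffer b
def Aemit (R : PySem.Dict String String) : List Char → List Char → List Char
  | [], _ => []
  | c :: cs, b =>
    match R.get? (String.ofList (b ++ [c])) with
    | some ch => ch.toList ++ Aemit R cs []
    | none => Aemit R cs (b ++ [c])

theorem foldA_eq_Aemit (R : PySem.Dict String String) (cs : List Char) (d b : List Char) :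
    (cs.foldl
      (fun (st : List Char × List Char) bit =>
        let buffer := st.2 ++ [bit]
        match R.get? (String.ofList buffer) with
        | some ch => (st.1 ++ ch.toList, ([] : List Char))
        | none => (st.1, buffer)) (d, b)).1 = d ++ Aemit R cs b := by
  induction cs generalizing d b with
  | nil => simp [Aemit]
  | cons c cs ih =>
    cases hg : R.get? (String.ofList (b ++ [c])) with
    | some ch => simp only [List.foldl_cons, Aemit, hg, ih, List.append_assoc]
    | none => simp only [List.foldl_cons, Aemit, hg, ih]

-- the two folds over code_dict build the same dictionary
theorem codesMax_fst (code_dict : List (String × String)) :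
    (pvCodesMax code_dict).1
      = code_dict.foldl (fun d kv => d.insert kv.2 kv.1) PySem.Dict.empty := by
  unfold pvCodesMax
  generalize PySem.Dict.empty = d0
  generalize 0 = m0
  induction code_dict generalizing d0 m0 with
  | nil => rfl
  | cons kv rest ih => simp only [List.foldl_cons]; exact ih _ _

-- every key of the built dictionary has length ≤ the computed maxlen
theorem codesMax_keylen (code_dict : List (String × String))
    (acc : PySem.Dict String String × Nat)
    (h : ∀ s c, acc.1.get? s = some c → s.toList.length ≤ acc.2) :
    ∀ s c,
      (code_dict.foldl
        (fun (st : PySem.Dict String String × Nat) kv =>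
          (st.1.insert kv.2 kv.1,
           if kv.2.toList.length > st.2 then kv.2.toList.length else st.2)) acc).1.get? s = some c →
      s.toList.length ≤
      (code_dict.foldl
        (fun (st : PySem.Dict String String × Nat) kv =>
          (st.1.insert kv.2 kv.1,
           if kv.2.toList.length > st.2 then kv.2.toList.length else st.2)) acc).2 := by
  induction code_dict generalizing acc with
  | nil => exact h
  | cons kv rest ih =>
    simp only [List.foldl_cons]
    refine ih _ ?_
    intro s c hs
    rw [PySem.Dict.get?_insert] at hs
    by_cases he : s = kv.2
    · subst he; split <;> omega
    · rw [if_neg he] at hs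
      have := h s c hs
      split <;> omega

-- once the buffer is at least as long as every key, A never emits again
theorem Aemit_dead (R : PySem.Dict String String) (M : Nat)
    (hk : ∀ s c, R.get? s = some c → s.toList.length ≤ M) :
    ∀ (cs b : List Char), M ≤ b.length → Aemit R cs b = [] := by
  intro cs
  induction cs with
  | nil => intro b _; rfl
  | cons c cs ih =>
    intro b hb
    show (match R.get? (String.ofList (b ++ [c])) with
          | some ch => ch.toList ++ Aemit R cs []
          | none => Aemit R cs (b ++ [c])) = []
    cases hg : R.get? (String.ofList (b ++ [c])) with
    | some ch =>
      have := hk _ _ hg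
      simp at this
      omega
    | none => exact ih (b ++ [c]) (by simp; omega)

-- the inner scan of B against A's buffer-growing steps
theorem scan_emit (R : PySem.Dict String String) (cs : List Char) (i : Nat) :
    ∀ (sfuel d : Nat),
    (∀ s c, R.get? s = some c → s.toList.length ≤ d + sfuel) →
    i + d ≤ cs.length →
    (match pvScan R cs cs.length i (i + d + 1) sfuel with
     | none => Aemit R (cs.drop (i + d)) ((cs.drop i).take d) = []
     | some hit => i + d < hit ∧ hit ≤ cs.length ∧
         ∃ ch, R.get? (String.ofList ((cs.drop i).take (hit - i))) = some ch ∧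
           Aemit R (cs.drop (i + d)) ((cs.drop i).take d)
             = ch.toList ++ Aemit R (cs.drop hit) []) := by
  intro sfuel
  induction sfuel with
  | zero =>
    intro d hk hin
    show Aemit R (cs.drop (i + d)) ((cs.drop i).take d) = []
    exact Aemit_dead R d hk _ _ (by simp; omega)
  | succ sfuel ih =>
    intro d hk hin
    show (match (if i + d + 1 ≤ cs.length then
            if (R.get? (String.ofList ((cs.drop i).take (i + d + 1 - i)))).isSome then some (i + d + 1)
            else pvScan R cs cs.length i (i + d + 1 + 1) sfuel
          else none) with
      | none => Aemit R (cs.drop (i + d)) ((cs.drop i).take d) = []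
      | some hit => i + d < hit ∧ hit ≤ cs.length ∧
          ∃ ch, R.get? (String.ofList ((cs.drop i).take (hit - i))) = some ch ∧
            Aemit R (cs.drop (i + d)) ((cs.drop i).take d)
              = ch.toList ++ Aemit R (cs.drop hit) [])
    have hidx : i + d + 1 - i = d + 1 := by omega
    by_cases hj : i + d + 1 ≤ cs.length
    · rw [if_pos hj, hidx]
      have hdlt : i + d < cs.length := by omega
      have hdrop : cs.drop (i + d) = cs[i + d] :: cs.drop (i + d + 1) :=
        List.drop_eq_getElem_cons hdlt
      have hdlt' : d < (cs.drop i).length := by simp; omega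
      have htake : (cs.drop i).take (d + 1) = (cs.drop i).take d ++ [cs[i + d]] := by
        rw [List.take_add_one, List.getElem?_eq_getElem hdlt']
        simp
      cases hg : R.get? (String.ofList ((cs.drop i).take (d + 1))) with
      | some ch =>
        simp only [Option.isSome_some, if_true]
        refine ⟨by omega, hj, ch, by rw [hidx]; exact hg, ?_⟩
        rw [hdrop]
        show (match R.get? (String.ofList ((cs.drop i).take d ++ [cs[i + d]])) with
              | some ch => ch.toList ++ Aemit R (cs.drop (i + d + 1)) []
              | none => Aemit R (cs.drop (i + d + 1)) ((cs.drop i).take d ++ [cs[i + d]]))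
            = ch.toList ++ Aemit R (cs.drop (i + d + 1)) []
        rw [← htake, hg]
      | none =>
        simp only [Option.isSome_none, Bool.false_eq_true, if_false]
        have hstep : Aemit R (cs.drop (i + d)) ((cs.drop i).take d)
            = Aemit R (cs.drop (i + d + 1)) ((cs.drop i).take (d + 1)) := by
          rw [hdrop]
          show (match R.get? (String.ofList ((cs.drop i).take d ++ [cs[i + d]])) with
                | some ch => ch.toList ++ Aemit R (cs.drop (i + d + 1)) []
                | none => Aemit R (cs.drop (i + d + 1)) ((cs.drop i).take d ++ [cs[i + d]]))
              = Aemit R (cs.drop (i + d + 1)) ((cs.drop i).take (d + 1))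
          rw [← htake, hg]
        have ih' := ih (d + 1) (by intro s c hs; have := hk s c hs; omega) (by omega)
        have harg : i + (d + 1) + 1 = i + d + 1 + 1 := by omega
        rw [harg] at ih'
        cases hscan : pvScan R cs cs.length i (i + d + 1 + 1) sfuel with
        | none =>
          rw [hscan] at ih'
          rw [hstep]
          have : i + (d + 1) = i + d + 1 := by omega
          rw [this] at ih'
          exact ih'
        | some hit =>
          rw [hscan] at ih'
          have : i + (d + 1) = i + d + 1 := by omega
          rw [this] at ih'
          obtain ⟨h1, h2, ch, h3, h4⟩ := ih'
          exact ⟨by omega, h2, ch, h3, by rw [hstep]; exact h4⟩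
    · rw [if_neg hj]
      show Aemit R (cs.drop (i + d)) ((cs.drop i).take d) = []
      have : cs.drop (i + d) = [] := List.drop_eq_nil_of_le (by omega)
      rw [this]; rfl

-- B's outer loop computes exactly A's emissions from a reset point
theorem loop_emit (R : PySem.Dict String String) (M : Nat)
    (hk : ∀ s c, R.get? s = some c → s.toList.length ≤ M) (cs : List Char) :
    ∀ (fuel i : Nat), cs.length ≤ i + fuel →
      pvLoop R M cs cs.length i fuel = Aemit R (cs.drop i) [] := by
  intro fuel
  induction fuel with
  | zero =>
    intro i hi
    have : cs.drop i = [] := List.drop_eq_nil_of_le (by omega)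
    rw [this]; rfl
  | succ fuel ih =>
    intro i hi
    show (if i < cs.length then
        match pvScan R cs cs.length i (i + 1) M with
        | none => []
        | some hit =>
          (match R.get? (String.ofList ((cs.drop i).take (hit - i))) with
           | some ch => ch.toList
           | none => []) ++ pvLoop R M cs cs.length hit fuel
      else []) = Aemit R (cs.drop i) []
    by_cases hlt : i < cs.length
    · rw [if_pos hlt]
      have hse := scan_emit R cs i M 0 (by intro s c hs; have := hk s c hs; omega) (by omega)
      simp only [Nat.add_zero, List.take_zero] at hse
      cases hscan : pvScan R cs cs.length i (i + 1) M with
      | none =>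
        rw [hscan] at hse
        show ([] : List Char) = Aemit R (cs.drop i) []
        exact hse.symm
      | some hit =>
        rw [hscan] at hse
        obtain ⟨h1, h2, ch, h3, h4⟩ := hse
        show (match R.get? (String.ofList ((cs.drop i).take (hit - i))) with
              | some ch => ch.toList
              | none => ([] : List Char)) ++ pvLoop R M cs cs.length hit fuel
            = Aemit R (cs.drop i) []
        rw [h3, h4, ih hit (by omega)]
    · rw [if_neg hlt]
      have : cs.drop i = [] := List.drop_eq_nil_of_le (by omega)
      rw [this]; rfl

-- ===== VERDICT (by name: the statement is the Claim_ definition above) =====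
theorem decode_with_dict_spec : Claim_equal_decode_with_dict := by
  intro encoded code_dict _
  have hk' : ∀ s c, (pvCodesMax code_dict).1.get? s = some c →
      s.toList.length ≤ (pvCodesMax code_dict).2 := by
    have := codesMax_keylen code_dict (PySem.Dict.empty, 0)
      (by intro s c hs; simp [PySem.Dict.get?_empty] at hs)
    simpa [pvCodesMax] using this
  unfold Spec_decode_with_dict decode_with_dict decode_with_dict_alt
  simp only [foldA_eq_Aemit, ← codesMax_fst, List.nil_append,
    loop_emit _ _ hk' encoded.toList encoded.toList.length 0 (by omega), List.drop_zero]
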